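-- pv_equiv track=rewrite | github.com/JavierHdzO/SE_ProyectoFinal | SE_Py_Proj_Int/mapData.py | mapeo
-- ===== SOURCE A (Python) =====
-- def mapeo(data):
--     result =[]
--     intervalos = [0, 102, 204, 306, 408, 510, 612, 714, 816, 918, 1023]
--
--     for arreglo in data:
--         temp = []
--         for elemento in arreglo:
--             indice = 0
--             for i in range(len(intervalos)):
--                 if elemento >= intervalos[i]:
--                     indice = i
--                 else:
--                     break
--
--             temp.append(indice + 1)
--         result.append(temp)
--
--     return result
-- ===== SOURCE B (Python) =====
-- from bisect import bisect_right
--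
-- _INTERVALOS = [0, 102, 204, 306, 408, 510, 612, 714, 816, 918, 1023]
--
-- def mapeo(data):
--     return [[max(bisect_right(_INTERVALOS, e), 1) for e in row] for row in data]
-- ===== Notes on version B (the rewrite author's own statement) =====
-- stated objective: idiomatic
-- what changed: Replaced the inner linear scan-and-break over the fixed interval table with a stdlib binary search (bisect.bisect_right, in C) clamped to 1, and the append loops with comprehensions.
import Mathlib
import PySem

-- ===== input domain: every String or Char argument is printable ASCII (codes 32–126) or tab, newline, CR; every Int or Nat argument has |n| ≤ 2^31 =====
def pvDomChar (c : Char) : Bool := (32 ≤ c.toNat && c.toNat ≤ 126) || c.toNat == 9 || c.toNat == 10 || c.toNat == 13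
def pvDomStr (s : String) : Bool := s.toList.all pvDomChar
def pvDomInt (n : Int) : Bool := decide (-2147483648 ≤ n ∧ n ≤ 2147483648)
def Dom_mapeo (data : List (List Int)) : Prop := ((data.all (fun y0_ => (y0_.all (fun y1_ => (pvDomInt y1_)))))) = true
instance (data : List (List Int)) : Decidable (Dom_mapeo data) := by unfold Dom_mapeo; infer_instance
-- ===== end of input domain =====

-- B replaces A's inner linear scan-and-break over the fixed interval table with a
-- binary search (bisect_right) clamped to 1; objective: idiomatic.

-- ===== PORT A =====
def pvIntervalos : List Int := [0, 102, 204, 306, 408, 510, 612, 714, 816, 918, 1023]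

-- inner 'for i in range(len(intervalos)): if elemento >= intervalos[i]: indice = i else: break'
def pvLoopA (e : Int) : List Int → Int → Int → Int
  | [], _, indice => indice
  | v :: rest, i, indice => if e ≥ v then pvLoopA e rest (i + 1) i else indice

def mapeo (data : List (List Int)) : List (List Int) :=
  data.foldl (fun result arreglo =>
    result ++ [arreglo.foldl (fun temp elemento => temp ++ [pvLoopA elemento pvIntervalos 0 0 + 1]) []]) []

-- ===== PORT B =====
-- bisect.bisect_right(a, x): lo=0, hi=len(a); while lo<hi: mid=(lo+hi)//2; if x<a[mid]: hi=mid else lo=mid+1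
def pvBisGo (a : List Int) (x : Int) (lo hi : Nat) : Nat :=
  if lo < hi then
    let mid := (lo + hi) / 2
    if x < a.getD mid 0 then pvBisGo a x lo mid else pvBisGo a x (mid + 1) hi
  else lo
termination_by hi - lo
decreasing_by all_goals omega

def pvBisectRight (a : List Int) (x : Int) : Nat := pvBisGo a x 0 a.length

def mapeo_alt (data : List (List Int)) : List (List Int) :=
  data.map (fun row => row.map (fun e => Int.ofNat (max (pvBisectRight pvIntervalos e) 1)))

-- ===== PRECONDITION & SPEC =====
def Spec_mapeo (data : List (List Int)) (out : List (List Int)) : Prop := out = mapeo_alt data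
instance (data : List (List Int)) (out : List (List Int)) : Decidable (Spec_mapeo data out) := by unfold Spec_mapeo; infer_instance

-- ===== CLAIM (what is proved, stated in full; the proofs are below) =====
def Claim_equal_mapeo : Prop := ∀ (data : List (List Int)), Dom_mapeo data → Spec_mapeo data (mapeo data)

-- ===== LEMMAS AND PROOFS =====
theorem pv_foldl_append_map {α β : Type} (f : α → β) :
    ∀ (l : List α) (acc : List β), l.foldl (fun a x => a ++ [f x]) acc = acc ++ l.map f := by
  intro l
  induction l with
  | nil => intro acc; simp
  | cons x xs ih => intro acc; simp [List.foldl, ih]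

set_option maxHeartbeats 1600000 in
theorem pv_elem_eq (e : Int) :
    pvLoopA e pvIntervalos 0 0 + 1 = Int.ofNat (max (pvBisectRight pvIntervalos e) 1) := by
  simp [pvBisectRight, pvBisGo, pvLoopA, pvIntervalos, List.getD]
  split_ifs <;> omega

-- ===== VERDICT (by name: the statement is the Claim_ definition above) =====
theorem mapeo_spec : Claim_equal_mapeo := by
  intro data _
  show mapeo data = mapeo_alt data
  unfold mapeo mapeo_alt
  rw [pv_foldl_append_map]
  simp only [List.nil_append]
  apply List.map_congr_left
  intro arr _
  rw [pv_foldl_append_map]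
  simp only [List.nil_append]
  apply List.map_congr_left
  intro e _
  exact pv_elem_eq e
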